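-- pv_equiv track=rewrite | github.com/HudsonVRamos/StreamingAIChatBot | cdk.out/asset.ba808d9ccbcc60e39994b28af4afe7dd17e5f92a3dd889609f9ac6ba9ab4aa2e/handler.py | _query_id_to_metric_name
-- ===== SOURCE A (Python) =====
-- _ONDEMAND_METRICS_CONFIG = {
--     "MediaLive": {
--         "namespace": "AWS/MediaLive",
--         "region": "sa-east-1",
--         "metrics": [
--             ("ActiveAlerts", "Maximum"),
--             ("InputLossSeconds", "Sum"),
--             ("InputVideoFrameRate", "Average"),
--             ("DroppedFrames", "Sum"),
--             ("FillMsec", "Sum"),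
--             ("NetworkIn", "Sum"),
--             ("NetworkOut", "Sum"),
--             ("Output4xxErrors", "Sum"),
--             ("Output5xxErrors", "Sum"),
--             ("PrimaryInputActive", "Minimum"),
--             ("ChannelInputErrorSeconds", "Sum"),
--             ("RtpPacketsLost", "Sum"),
--         ],
--     },
--     "MediaPackage": {
--         "namespace": "AWS/MediaPackage",
--         "region": "sa-east-1",
--         "metrics": [
--             ("IngressBytes", "Sum"),
--             ("IngressRequestCount", "Sum"),
--             ("EgressBytes", "Sum"),
--             ("EgressRequestCount", "Sum"),
--             ("EgressResponseTime", "Average"),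
--             ("IngressResponseTime", "Average"),
--         ],
--     },
--     "MediaTailor": {
--         "namespace": "AWS/MediaTailor",
--         "region": "us-east-1",
--         "metrics": [
--             ("AdDecisionServer.Ads", "Sum"),
--             ("AdDecisionServer.Duration", "Sum"),
--             ("AdDecisionServer.Errors", "Sum"),
--             ("AdDecisionServer.Timeouts", "Sum"),
--             ("Avail.Duration", "Sum"),
--             ("Avail.FilledDuration", "Sum"),
--             ("Avail.FillRate", "Average"),
--         ],
--     },
--     "CloudFront": {
--         "namespace": "AWS/CloudFront",
--         "region": "us-east-1",
--         "metrics": [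
--             ("Requests", "Sum"),
--             ("BytesDownloaded", "Sum"),
--             ("BytesUploaded", "Sum"),
--             ("4xxErrorRate", "Average"),
--             ("5xxErrorRate", "Average"),
--             ("TotalErrorRate", "Average"),
--         ],
--     },
-- }
--
-- def _query_id_to_metric_name(query_id: str, servico: str) -> str:
--     """Convert a CloudWatch query ID back to a metric name.
--
--     Handles pipeline suffixes for MediaLive and StatusCode suffixes
--     for MediaPackage EgressRequestCount.
--     """
--     if servico == "MediaLive":
--         # Remove pipeline suffix (_0 or _1)
--         for suffix in ("_0", "_1"):
--             if query_id.endswith(suffix):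
--                 base = query_id[: -len(suffix)]
--                 return _underscore_to_metric(base)
--         return _underscore_to_metric(query_id)
--
--     if servico == "MediaPackage":
--         # EgressRequestCount with StatusCode suffix
--         for sc in ("_2xx", "_4xx", "_5xx"):
--             if query_id.endswith(sc):
--                 return f"EgressRequestCount{sc}"
--         return _underscore_to_metric(query_id)
--
--     return _underscore_to_metric(query_id)
--
-- def _underscore_to_metric(query_id: str) -> str:
--     """Best-effort conversion of underscore query_id to original metric name.
--
--     Looks up the metric config to find the original name.
--     """
--     for svc_config in _ONDEMAND_METRICS_CONFIG.values():
--         for metric_name, _ in svc_config["metrics"]: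
--             if metric_name.replace(".", "_").lower() == query_id:
--                 return metric_name
--     # Fallback: return as-is
--     return query_id
-- ===== SOURCE B (Python) =====
-- _ONDEMAND_METRICS_CONFIG = {
--     "MediaLive": {
--         "namespace": "AWS/MediaLive",
--         "region": "sa-east-1",
--         "metrics": [
--             ("ActiveAlerts", "Maximum"),
--             ("InputLossSeconds", "Sum"),
--             ("InputVideoFrameRate", "Average"),
--             ("DroppedFrames", "Sum"),
--             ("FillMsec", "Sum"),
--             ("NetworkIn", "Sum"),
--             ("NetworkOut", "Sum"),
--             ("Output4xxErrors", "Sum"),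
--             ("Output5xxErrors", "Sum"),
--             ("PrimaryInputActive", "Minimum"),
--             ("ChannelInputErrorSeconds", "Sum"),
--             ("RtpPacketsLost", "Sum"),
--         ],
--     },
--     "MediaPackage": {
--         "namespace": "AWS/MediaPackage",
--         "region": "sa-east-1",
--         "metrics": [
--             ("IngressBytes", "Sum"),
--             ("IngressRequestCount", "Sum"),
--             ("EgressBytes", "Sum"),
--             ("EgressRequestCount", "Sum"),
--             ("EgressResponseTime", "Average"),
--             ("IngressResponseTime", "Average"),
--         ],
--     },
--     "MediaTailor": {
--         "namespace": "AWS/MediaTailor",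
--         "region": "us-east-1",
--         "metrics": [
--             ("AdDecisionServer.Ads", "Sum"),
--             ("AdDecisionServer.Duration", "Sum"),
--             ("AdDecisionServer.Errors", "Sum"),
--             ("AdDecisionServer.Timeouts", "Sum"),
--             ("Avail.Duration", "Sum"),
--             ("Avail.FilledDuration", "Sum"),
--             ("Avail.FillRate", "Average"),
--         ],
--     },
--     "CloudFront": {
--         "namespace": "AWS/CloudFront",
--         "region": "us-east-1",
--         "metrics": [
--             ("Requests", "Sum"),
--             ("BytesDownloaded", "Sum"),
--             ("BytesUploaded", "Sum"),
--             ("4xxErrorRate", "Average"),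
--             ("5xxErrorRate", "Average"),
--             ("TotalErrorRate", "Average"),
--         ],
--     },
-- }
--
-- # Sorted lookup table built once: (normalized id, original metric name), sorted by
-- # normalized id.  The 31 normalized ids are pairwise distinct, so binary search over
-- # the sorted table finds exactly the metric A's first-match scan would find.
-- _SORTED_METRICS = sorted(
--     [
--         (name.replace(".", "_").lower(), name)
--         for svc in _ONDEMAND_METRICS_CONFIG.values()
--         for name, _stat in svc["metrics"]
--     ],
--     key=lambda pair: pair[0],
-- )
--
--
-- def _bsearch_metric(pairs, query_id):
--     """Binary search for query_id among the sorted (normalized id, name) pairs."""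
--     if not pairs:
--         return None
--     mid = len(pairs) // 2
--     key, name = pairs[mid]
--     if query_id < key:
--         return _bsearch_metric(pairs[:mid], query_id)
--     if query_id > key:
--         return _bsearch_metric(pairs[mid + 1:], query_id)
--     return name
--
--
-- def _lookup(query_id):
--     found = _bsearch_metric(_SORTED_METRICS, query_id)
--     return query_id if found is None else found
--
--
-- def _query_id_to_metric_name(query_id: str, servico: str) -> str:
--     """Convert a CloudWatch query ID back to a metric name."""
--     if servico == "MediaLive":
--         for suffix in ("_0", "_1"):
--             if query_id.endswith(suffix):
--                 return _lookup(query_id[: -len(suffix)])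
--         return _lookup(query_id)
--
--     if servico == "MediaPackage":
--         for sc in ("_2xx", "_4xx", "_5xx"):
--             if query_id.endswith(sc):
--                 return f"EgressRequestCount{sc}"
--         return _lookup(query_id)
--
--     return _lookup(query_id)
-- ===== Notes on version B (the rewrite author's own statement) =====
-- stated objective: alternative
-- what changed: Replaced A's per-call nested linear scan over every service's metrics with a (normalized id, name) table sorted once at module load and a recursive binary search per lookup; since the 31 normalized ids are pairwise distinct, binary search returns exactly the metric A's first-match scan finds.
import Mathlib
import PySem

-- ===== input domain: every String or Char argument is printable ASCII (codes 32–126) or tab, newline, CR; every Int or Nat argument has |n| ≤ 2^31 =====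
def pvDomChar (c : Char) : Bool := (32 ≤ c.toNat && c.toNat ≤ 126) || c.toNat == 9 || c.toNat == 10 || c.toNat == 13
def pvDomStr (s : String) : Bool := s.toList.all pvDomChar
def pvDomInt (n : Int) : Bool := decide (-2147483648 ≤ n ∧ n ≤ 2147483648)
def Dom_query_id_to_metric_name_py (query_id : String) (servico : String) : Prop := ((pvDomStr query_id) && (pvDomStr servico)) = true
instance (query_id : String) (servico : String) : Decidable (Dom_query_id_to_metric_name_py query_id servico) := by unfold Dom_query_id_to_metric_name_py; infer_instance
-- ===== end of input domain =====

-- B replaces A's per-call nested scan of the metric config by a sorted table built once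
-- and a recursive binary search; objective: alternative algorithm (the 31 normalized
-- ids are pairwise distinct, so binary search finds exactly A's first match).

-- ===== PORT A =====
-- the module constant _ONDEMAND_METRICS_CONFIG: (service, namespace, region, metrics)
def pvConfig : List (String × String × String × List (String × String)) := [
  ("MediaLive", "AWS/MediaLive", "sa-east-1",
    [("ActiveAlerts", "Maximum"), ("InputLossSeconds", "Sum"), ("InputVideoFrameRate", "Average"),
     ("DroppedFrames", "Sum"), ("FillMsec", "Sum"), ("NetworkIn", "Sum"), ("NetworkOut", "Sum"),
     ("Output4xxErrors", "Sum"), ("Output5xxErrors", "Sum"), ("PrimaryInputActive", "Minimum"),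
     ("ChannelInputErrorSeconds", "Sum"), ("RtpPacketsLost", "Sum")]),
  ("MediaPackage", "AWS/MediaPackage", "sa-east-1",
    [("IngressBytes", "Sum"), ("IngressRequestCount", "Sum"), ("EgressBytes", "Sum"),
     ("EgressRequestCount", "Sum"), ("EgressResponseTime", "Average"), ("IngressResponseTime", "Average")]),
  ("MediaTailor", "AWS/MediaTailor", "us-east-1",
    [("AdDecisionServer.Ads", "Sum"), ("AdDecisionServer.Duration", "Sum"),
     ("AdDecisionServer.Errors", "Sum"), ("AdDecisionServer.Timeouts", "Sum"),
     ("Avail.Duration", "Sum"), ("Avail.FilledDuration", "Sum"), ("Avail.FillRate", "Average")]),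
  ("CloudFront", "AWS/CloudFront", "us-east-1",
    [("Requests", "Sum"), ("BytesDownloaded", "Sum"), ("BytesUploaded", "Sum"),
     ("4xxErrorRate", "Average"), ("5xxErrorRate", "Average"), ("TotalErrorRate", "Average")])]

-- metric_name.replace(".", "_").lower()
def pvNormId (m : String) : String := PySem.Str.lower (PySem.Str.replace m "." "_")

-- inner loop of _underscore_to_metric: first metric whose normalized name equals q
def pvFindMetric (q : String) : List (String × String) → Option String
  | [] => none
  | (m, _) :: rest => if pvNormId m == q then some m else pvFindMetric q rest

-- outer loop over the services
def pvScanSvcs (q : String) : List (String × String × String × List (String × String)) → Option String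
  | [] => none
  | (_, _, _, ms) :: rest =>
    match pvFindMetric q ms with
    | some m => some m
    | none => pvScanSvcs q rest

def pvUnderscoreToMetric (q : String) : String := (pvScanSvcs q pvConfig).getD q

def query_id_to_metric_name_py (query_id : String) (servico : String) : String :=
  if servico == "MediaLive" then
    if PySem.Str.endswith query_id "_0" then
      pvUnderscoreToMetric (PySem.Str.slice query_id none (some (-2)))
    else if PySem.Str.endswith query_id "_1" then
      pvUnderscoreToMetric (PySem.Str.slice query_id none (some (-2)))
    else pvUnderscoreToMetric query_id
  else if servico == "MediaPackage" then
    if PySem.Str.endswith query_id "_2xx" then "EgressRequestCount_2xx"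
    else if PySem.Str.endswith query_id "_4xx" then "EgressRequestCount_4xx"
    else if PySem.Str.endswith query_id "_5xx" then "EgressRequestCount_5xx"
    else pvUnderscoreToMetric query_id
  else pvUnderscoreToMetric query_id

-- ===== PORT B =====
-- _SORTED_METRICS: (normalized id, name) pairs sorted once by normalized id
def pvSortedMetrics : List (String × String) :=
  PySem.List.sorted
    (pvConfig.flatMap (fun svc => svc.2.2.2.map (fun p => (pvNormId p.1, p.1))))
    (fun pair => pair.1) false

-- _bsearch_metric: recursive binary search on the sorted pairs
def pvBsearchMetric (q : String) : List (String × String) → Option String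
  | [] => none
  | x :: xs =>
    if q < ((x :: xs).getD ((x :: xs).length / 2) ("", "")).1 then
      pvBsearchMetric q ((x :: xs).take ((x :: xs).length / 2))
    else if ((x :: xs).getD ((x :: xs).length / 2) ("", "")).1 < q then
      pvBsearchMetric q ((x :: xs).drop ((x :: xs).length / 2 + 1))
    else some ((x :: xs).getD ((x :: xs).length / 2) ("", "")).2
termination_by l => l.length
decreasing_by
  all_goals simp [List.length_take]; try omega

-- _lookup
def pvLookup (q : String) : String :=
  match pvBsearchMetric q pvSortedMetrics with
  | none => q
  | some m => m

def query_id_to_metric_name_py_alt (query_id : String) (servico : String) : String :=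
  if servico == "MediaLive" then
    if PySem.Str.endswith query_id "_0" then
      pvLookup (PySem.Str.slice query_id none (some (-2)))
    else if PySem.Str.endswith query_id "_1" then
      pvLookup (PySem.Str.slice query_id none (some (-2)))
    else pvLookup query_id
  else if servico == "MediaPackage" then
    if PySem.Str.endswith query_id "_2xx" then "EgressRequestCount_2xx"
    else if PySem.Str.endswith query_id "_4xx" then "EgressRequestCount_4xx"
    else if PySem.Str.endswith query_id "_5xx" then "EgressRequestCount_5xx"
    else pvLookup query_id
  else pvLookup query_id

-- ===== PRECONDITION & SPEC =====
def Spec_query_id_to_metric_name_py (query_id : String) (servico : String) (out : String) : Prop := out = query_id_to_metric_name_py_alt query_id servico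
instance (query_id : String) (servico : String) (out : String) : Decidable (Spec_query_id_to_metric_name_py query_id servico out) := by unfold Spec_query_id_to_metric_name_py; infer_instance

-- ===== CLAIM (what is proved, stated in full; the proofs are below) =====
def Claim_equal_query_id_to_metric_name_py : Prop := ∀ (query_id : String) (servico : String), Dom_query_id_to_metric_name_py query_id servico → Spec_query_id_to_metric_name_py query_id servico (query_id_to_metric_name_py query_id servico)

-- ===== LEMMAS AND PROOFS =====

-- the flattened (normalized id, name) pairs in config order
def pvFlat : List (String × String) :=
  pvConfig.flatMap (fun svc => svc.2.2.2.map (fun p => (pvNormId p.1, p.1)))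

-- first-match association lookup, the common characterisation of both sides
def pvLookA (q : String) : List (String × String) → Option String
  | [] => none
  | (k, v) :: rest => if k == q then some v else pvLookA q rest

lemma pvFindMetric_eq (q : String) (ms : List (String × String)) :
    pvFindMetric q ms = pvLookA q (ms.map (fun p => (pvNormId p.1, p.1))) := by
  induction ms with
  | nil => rfl
  | cons p rest ih => cases p; simp [pvFindMetric, pvLookA, ih]

lemma pvLookA_append (q : String) (l₁ l₂ : List (String × String)) :
    pvLookA q (l₁ ++ l₂) = match pvLookA q l₁ with
      | some v => some v
      | none => pvLookA q l₂ := by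
  induction l₁ with
  | nil => rfl
  | cons p rest ih => cases p with | mk k v => by_cases h : k == q <;> simp [pvLookA, h, ih]

lemma pvScanSvcs_eq (q : String) (svcs : List (String × String × String × List (String × String))) :
    pvScanSvcs q svcs
      = pvLookA q (svcs.flatMap (fun s => s.2.2.2.map (fun p => (pvNormId p.1, p.1)))) := by
  induction svcs with
  | nil => rfl
  | cons s rest ih =>
    obtain ⟨_, _, _, ms⟩ := s
    simp only [pvScanSvcs, List.flatMap_cons, pvLookA_append, pvFindMetric_eq, ih]

lemma pvLookA_eq_none_of (q : String) (l : List (String × String))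
    (h : ∀ p ∈ l, p.1 ≠ q) : pvLookA q l = none := by
  induction l with
  | nil => rfl
  | cons p rest ih =>
    cases p with | mk k v =>
    have hk : k ≠ q := h (k, v) (List.mem_cons_self ..)
    simp only [pvLookA, beq_iff_eq, if_neg hk]
    exact ih fun p hp => h p (List.mem_cons_of_mem _ hp)

lemma pvLookA_none_forall (q : String) (l : List (String × String))
    (h : pvLookA q l = none) : ∀ p ∈ l, p.1 ≠ q := by
  induction l with
  | nil => intro p hp; cases hp
  | cons p rest ih =>
    cases p with | mk k v =>
    by_cases hk : k = q
    · simp [pvLookA, hk] at h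
    · intro p hp
      rcases List.mem_cons.mp hp with h1 | h2
      · subst h1; exact hk
      · exact ih (by simpa [pvLookA, hk] using h) p h2

lemma pvLookA_mem_of_some (q : String) (l : List (String × String)) (v : String)
    (h : pvLookA q l = some v) : (q, v) ∈ l := by
  induction l with
  | nil => cases h
  | cons p rest ih =>
    cases p with | mk k w =>
    by_cases hk : k = q
    · simp only [pvLookA, beq_iff_eq, if_pos hk, Option.some.injEq] at h
      subst hk; subst h; exact List.mem_cons_self ..
    · exact List.mem_cons_of_mem _ (ih (by simpa [pvLookA, hk] using h))

lemma pvLookA_of_mem (q : String) (l : List (String × String)) (v : String)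
    (nd : (l.map Prod.fst).Nodup) (h : (q, v) ∈ l) : pvLookA q l = some v := by
  induction l with
  | nil => cases h
  | cons p rest ih =>
    cases p with | mk k w =>
    rcases List.mem_cons.mp h with h1 | h2
    · obtain ⟨hq, hv⟩ := Prod.mk.injEq .. ▸ h1
      simp [pvLookA, hq.symm, hv]
    · have nd' : (k :: rest.map Prod.fst).Nodup := by simpa using nd
      have hk : k ≠ q := by
        intro hkq
        have : q ∈ rest.map Prod.fst := List.mem_map_of_mem h2
        exact absurd (hkq ▸ this) (List.nodup_cons.mp nd').1
      simp only [pvLookA, beq_iff_eq, if_neg hk]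
      exact ih (by simpa using (List.nodup_cons.mp nd').2) h2

lemma pvLookA_perm (l l' : List (String × String)) (hp : l.Perm l')
    (nd : (l.map Prod.fst).Nodup) (q : String) : pvLookA q l = pvLookA q l' := by
  have nd' : (l'.map Prod.fst).Nodup := ((hp.map Prod.fst).nodup_iff).mp nd
  cases hc : pvLookA q l with
  | some v => exact (pvLookA_of_mem q l' v nd' (hp.mem_iff.mp (pvLookA_mem_of_some q l v hc))).symm
  | none =>
    exact (pvLookA_eq_none_of q l' fun p hpm =>
      pvLookA_none_forall q l hc p (hp.mem_iff.mpr hpm)).symm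

-- binary search over a strictly key-sorted list is first-match association lookup
lemma pvBsearch_eq_lookA (q : String) : ∀ (n : ℕ) (l : List (String × String)),
    l.length ≤ n → l.Pairwise (fun a b => a.1 < b.1) →
    pvBsearchMetric q l = pvLookA q l := by
  intro n
  induction n with
  | zero =>
    intro l hl _
    have : l = [] := List.eq_nil_of_length_eq_zero (Nat.le_zero.mp hl)
    subst this; simp [pvBsearchMetric, pvLookA]
  | succ n ih =>
    intro l hl hs
    cases l with
    | nil => simp [pvBsearchMetric, pvLookA]
    | cons x xs =>
      set L := x :: xs with hL
      set m := L.length / 2 with hm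
      have hmlt : m < L.length := by simp [hL, hm]; omega
      have hget : L.getD m ("", "") = L[m] := List.getD_eq_getElem L ("", "") hmlt
      have hsplit : L = L.take m ++ L[m] :: L.drop (m + 1) := by
        conv_lhs => rw [← List.take_append_drop m L, List.drop_eq_getElem_cons hmlt]
      have hcross : ∀ a ∈ L.take m, ∀ b ∈ L[m] :: L.drop (m + 1), a.1 < b.1 := by
        have := hsplit ▸ hs
        exact (List.pairwise_append.mp this).2.2
      have hmid : (L[m] :: L.drop (m + 1)).Pairwise (fun a b => a.1 < b.1) :=
        (List.pairwise_append.mp (hsplit ▸ hs)).2.1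
      have htk : (L.take m).length ≤ n := by
        simp [List.length_take]; omega
      have hdr : (L.drop (m + 1)).length ≤ n := by
        simp; omega
      have hstk : (L.take m).Pairwise (fun a b => a.1 < b.1) :=
        hs.sublist (List.take_sublist m L)
      have hsdr : (L.drop (m + 1)).Pairwise (fun a b => a.1 < b.1) :=
        hs.sublist (List.drop_sublist (m + 1) L)
      rw [show pvBsearchMetric q L =
        (if q < (L.getD (L.length / 2) ("", "")).1 then
          pvBsearchMetric q (L.take (L.length / 2))
        else if (L.getD (L.length / 2) ("", "")).1 < q then
          pvBsearchMetric q (L.drop (L.length / 2 + 1))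
        else some (L.getD (L.length / 2) ("", "")).2) from by rw [hL, pvBsearchMetric]]
      rw [← hm, hget]
      have hrhs : pvLookA q L = match pvLookA q (L.take m) with
          | some v => some v
          | none => pvLookA q (L[m] :: L.drop (m + 1)) := by
        conv_lhs => rw [hsplit]
        exact pvLookA_append q _ _
      split_ifs with h1 h2
      · -- q < key at m : result is in the left half
        rw [ih (L.take m) htk hstk, hrhs]
        cases hc : pvLookA q (L.take m) with
        | some v => simp
        | none =>
          have : pvLookA q (L[m] :: L.drop (m + 1)) = none := by
            apply pvLookA_eq_none_of
            intro p hp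
            rcases List.mem_cons.mp hp with h' | h'
            · subst h'; exact ne_of_gt h1
            · have : L[m].1 < p.1 := (List.pairwise_cons.mp hmid).1 p h'
              exact ne_of_gt (lt_trans h1 this)
          simp only [this]
      · -- key at m < q : result is in the right half
        rw [ih (L.drop (m + 1)) hdr hsdr, hrhs]
        have hnone : pvLookA q (L.take m) = none := by
          apply pvLookA_eq_none_of
          intro p hp
          have : p.1 < L[m].1 := hcross p hp L[m] (List.mem_cons_self ..)
          exact ne_of_lt (lt_trans this h2)
        rw [hnone]
        have hkq : L[m].1 ≠ q := ne_of_lt h2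
        simp [pvLookA, hkq]
      · -- found
        have hkq : L[m].1 = q := le_antisymm (not_lt.mp h1) (not_lt.mp h2)
        rw [hrhs]
        have hnone : pvLookA q (L.take m) = none := by
          apply pvLookA_eq_none_of
          intro p hp
          have : p.1 < L[m].1 := hcross p hp L[m] (List.mem_cons_self ..)
          exact ne_of_lt (hkq ▸ this)
        rw [hnone]
        simp [pvLookA, hkq]

-- the flat table has pairwise-distinct keys (31 concrete strings)
lemma pvFlat_keys_nodup : (pvFlat.map Prod.fst).Nodup := by decide

lemma pvSorted_pairwise_lt : pvSortedMetrics.Pairwise (fun a b => a.1 < b.1) := by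
  have hperm : pvSortedMetrics.Perm pvFlat :=
    PySem.List.sorted_perm (xs := pvFlat) (key := fun pair => pair.1) (rev := false)
  have hle : pvSortedMetrics.Pairwise (fun a b => a.1 ≤ b.1) :=
    PySem.List.sorted_pairwise (xs := pvFlat) (key := fun pair => pair.1)
  have hnd : (pvSortedMetrics.map Prod.fst).Nodup :=
    ((hperm.map Prod.fst).nodup_iff).mpr pvFlat_keys_nodup
  have hne : pvSortedMetrics.Pairwise (fun a b => a.1 ≠ b.1) :=
    List.pairwise_map.mp hnd
  exact (hle.and hne).imp fun h => lt_of_le_of_ne h.1 h.2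

lemma pvCore (q : String) : pvUnderscoreToMetric q = pvLookup q := by
  have hperm : pvSortedMetrics.Perm pvFlat :=
    PySem.List.sorted_perm (xs := pvFlat) (key := fun pair => pair.1) (rev := false)
  have h1 : pvBsearchMetric q pvSortedMetrics = pvLookA q pvFlat := by
    rw [pvBsearch_eq_lookA q pvSortedMetrics.length pvSortedMetrics le_rfl pvSorted_pairwise_lt]
    exact pvLookA_perm _ _ hperm (((hperm.map Prod.fst).nodup_iff).mpr pvFlat_keys_nodup) q
  rw [pvUnderscoreToMetric, pvScanSvcs_eq, pvLookup, h1,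
    show (pvConfig.flatMap (fun s => s.2.2.2.map (fun p => (pvNormId p.1, p.1)))) = pvFlat from rfl]
  cases pvLookA q pvFlat <;> rfl

-- ===== VERDICT (by name: the statement is the Claim_ definition above) =====
theorem query_id_to_metric_name_py_spec : Claim_equal_query_id_to_metric_name_py := by
  intro query_id servico _
  unfold Spec_query_id_to_metric_name_py query_id_to_metric_name_py query_id_to_metric_name_py_alt
  split_ifs <;> first | exact pvCore _ | rfl
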